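-- pv_equiv track=rewrite | github.com/luigi311/JellyPlex-Watched | src/library.py | check_blacklist_logic
-- ===== SOURCE A (Python) =====
-- def check_blacklist_logic(
--     library_title: str,
--     library_type: str,
--     blacklist_library: list[str],
--     blacklist_library_type: list[str],
--     library_other: str | None = None,
-- ):
--     skip_reason = None
--     if isinstance(library_type, (list, tuple, set)):
--         for library_type_item in library_type:
--             if library_type_item.lower() in blacklist_library_type:
--                 skip_reason = f"{library_type_item} is in blacklist_library_type"
--     else:
--         if library_type.lower() in blacklist_library_type:
--             skip_reason = f"{library_type} is in blacklist_library_type"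
--
--     if library_title.lower() in [x.lower() for x in blacklist_library]:
--         if skip_reason:
--             skip_reason = (
--                 skip_reason + " and " + f"{library_title} is in blacklist_library"
--             )
--         else:
--             skip_reason = f"{library_title} is in blacklist_library"
--
--     if library_other:
--         if library_other.lower() in [x.lower() for x in blacklist_library]:
--             if skip_reason:
--                 skip_reason = (
--                     skip_reason + " and " + f"{library_other} is in blacklist_library"
--                 )
--             else:
--                 skip_reason = f"{library_other} is in blacklist_library"
--
--     return skip_reason
-- ===== SOURCE B (Python) =====
-- def check_blacklist_logic(
--     library_title: str,
--     library_type: str,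
--     blacklist_library: list[str],
--     blacklist_library_type: list[str],
--     library_other: str | None = None,
-- ):
--     lowered = [x.lower() for x in blacklist_library]
--     checks = [
--         (library_type, blacklist_library_type, "blacklist_library_type"),
--         (library_title, lowered, "blacklist_library"),
--     ]
--     if library_other:
--         checks.append((library_other, lowered, "blacklist_library"))
--     reasons = [
--         f"{value} is in {where}"
--         for value, pool, where in checks
--         if value.lower() in pool
--     ]
--     return " and ".join(reasons) if reasons else None
-- ===== Notes on version B (the rewrite author's own statement) =====
-- stated objective: alternative
-- what changed: Table-driven: B builds a uniform list of (value, pool, listname) checks, produces the messages with one filtering comprehension over that table and one ' and '.join (empty -> None), instead of A's three separate branches each mutating a skip_reason string.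
import Mathlib
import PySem

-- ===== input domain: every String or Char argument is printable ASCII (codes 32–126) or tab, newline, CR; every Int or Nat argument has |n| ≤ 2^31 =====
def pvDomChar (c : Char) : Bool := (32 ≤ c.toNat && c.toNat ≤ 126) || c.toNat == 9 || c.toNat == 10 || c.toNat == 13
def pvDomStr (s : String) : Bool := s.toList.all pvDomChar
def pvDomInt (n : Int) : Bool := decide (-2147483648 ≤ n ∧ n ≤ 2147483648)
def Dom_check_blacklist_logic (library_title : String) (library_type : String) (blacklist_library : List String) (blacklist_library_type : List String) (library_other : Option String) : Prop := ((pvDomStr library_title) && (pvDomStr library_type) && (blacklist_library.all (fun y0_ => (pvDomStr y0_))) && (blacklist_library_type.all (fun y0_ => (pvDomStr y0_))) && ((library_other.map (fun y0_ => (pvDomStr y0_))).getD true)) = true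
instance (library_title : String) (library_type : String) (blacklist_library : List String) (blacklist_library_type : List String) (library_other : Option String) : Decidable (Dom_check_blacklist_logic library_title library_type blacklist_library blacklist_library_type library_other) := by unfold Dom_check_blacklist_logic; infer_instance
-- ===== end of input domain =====

-- ===== PORT A =====
-- B replaces A's three branches mutating skip_reason by a table of (value, pool, listname)
-- checks processed by one filter+format pass and one join; equivalence proved on all inputs.
def check_blacklist_logic (library_title : String) (library_type : String) (blacklist_library : List String) (blacklist_library_type : List String) (library_other : Option String) : Option String :=
  -- library_type is a str, so Python's isinstance(list/tuple/set) branch is dead; the scalar branch is ported.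
  let skip_reason : Option String :=
    if blacklist_library_type.contains (PySem.Str.lower library_type) then
      some (library_type ++ " is in blacklist_library_type")
    else none
  let skip_reason : Option String :=
    if (blacklist_library.map PySem.Str.lower).contains (PySem.Str.lower library_title) then
      match skip_reason with
      | some r => some (r ++ " and " ++ (library_title ++ " is in blacklist_library"))
      | none => some (library_title ++ " is in blacklist_library")
    else skip_reason
  match library_other with
  | none => skip_reason
  | some lo =>
    if lo ≠ "" then  -- Python truthiness of the str
      if (blacklist_library.map PySem.Str.lower).contains (PySem.Str.lower lo) then
        match skip_reason with
        | some r => some (r ++ " and " ++ (lo ++ " is in blacklist_library"))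
        | none => some (lo ++ " is in blacklist_library")
      else skip_reason
    else skip_reason

-- ===== PORT B =====
def check_blacklist_logic_alt (library_title : String) (library_type : String) (blacklist_library : List String) (blacklist_library_type : List String) (library_other : Option String) : Option String :=
  let lowered := blacklist_library.map PySem.Str.lower
  let checks : List (String × List String × String) :=
    [(library_type, blacklist_library_type, "blacklist_library_type"),
     (library_title, lowered, "blacklist_library")] ++
    (match library_other with
     | some lo => if lo ≠ "" then [(lo, lowered, "blacklist_library")] else []
     | none => [])
  let reasons :=
    (checks.filter (fun c => c.2.1.contains (PySem.Str.lower c.1))).map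
      (fun c => c.1 ++ " is in " ++ c.2.2)
  if reasons.isEmpty then none else some (PySem.Str.join " and " reasons)

-- ===== PRECONDITION & SPEC =====
def Spec_check_blacklist_logic (library_title : String) (library_type : String) (blacklist_library : List String) (blacklist_library_type : List String) (library_other : Option String) (out : Option String) : Prop := out = check_blacklist_logic_alt library_title library_type blacklist_library blacklist_library_type library_other
instance (library_title : String) (library_type : String) (blacklist_library : List String) (blacklist_library_type : List String) (library_other : Option String) (out : Option String) : Decidable (Spec_check_blacklist_logic library_title library_type blacklist_library blacklist_library_type library_other out) := by unfold Spec_check_blacklist_logic; infer_instance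

-- ===== CLAIM (what is proved, stated in full; the proofs are below) =====
def Claim_equal_check_blacklist_logic : Prop := ∀ (library_title : String) (library_type : String) (blacklist_library : List String) (blacklist_library_type : List String) (library_other : Option String), Dom_check_blacklist_logic library_title library_type blacklist_library blacklist_library_type library_other → Spec_check_blacklist_logic library_title library_type blacklist_library blacklist_library_type library_other (check_blacklist_logic library_title library_type blacklist_library blacklist_library_type library_other)

-- ===== LEMMAS AND PROOFS =====
theorem join_one (a : String) : PySem.Str.join " and " [a] = a := by
  simp only [PySem.Str.join, List.map]
  rw [PySem.Chars.join_singleton, String.ofList_toList]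

theorem join_two (a b : String) : PySem.Str.join " and " [a, b] = a ++ " and " ++ b := by
  simp only [PySem.Str.join, List.map]
  rw [PySem.Chars.join_cons_cons, PySem.Chars.join_singleton]
  rw [String.ofList_append, String.ofList_append, String.ofList_toList, String.ofList_toList, String.ofList_toList]

theorem join_three (a b c : String) : PySem.Str.join " and " [a, b, c] = a ++ " and " ++ b ++ " and " ++ c := by
  simp only [PySem.Str.join, List.map]
  rw [PySem.Chars.join_cons_cons, PySem.Chars.join_cons_cons, PySem.Chars.join_singleton]
  rw [← List.append_assoc, ← List.append_assoc]
  rw [String.ofList_append, String.ofList_append, String.ofList_append, String.ofList_append]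
  rw [String.ofList_toList, String.ofList_toList, String.ofList_toList, String.ofList_toList]

theorem lit_lib : (" is in " ++ "blacklist_library" : String) = " is in blacklist_library" := rfl

theorem lit_typ : (" is in " ++ "blacklist_library_type" : String) = " is in blacklist_library_type" := rfl

-- ===== VERDICT (by name: the statement is the Claim_ definition above) =====
set_option maxHeartbeats 2000000 in
theorem check_blacklist_logic_spec : Claim_equal_check_blacklist_logic := by
  intro t ty bl blt lo _
  unfold Spec_check_blacklist_logic check_blacklist_logic check_blacklist_logic_alt
  cases lo with
  | none =>
    simp only [List.append_nil, List.filter_cons, List.filter_nil]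
    split_ifs <;>
    simp_all [join_one, join_two, String.append_assoc, lit_lib, lit_typ]
  | some lo =>
    simp only [List.filter_append, List.filter_cons, List.filter_nil]
    split_ifs <;>
    simp_all [List.filter_nil, join_one, join_two, join_three,
      String.append_assoc, lit_lib, lit_typ]
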